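-- pv_equiv track=rewrite | github.com/xongeeuse/Algorithm_study | Week08/도경원/할인행사.py | solution
-- ===== SOURCE A (Python) =====
-- from collections import Counter
--
-- def solution(want, number, discount):
--     answer = 0
--     want_dict = dict(zip(want, number))
--
--     for i in range(len(discount) - 9):
--         window = discount[i:i + 10]
--         window_counter = Counter(window)
--
--         if all(window_counter[item] == want_dict[item] for item in want):
--             answer += 1
--
--     return answer
-- ===== SOURCE B (Python) =====
-- def solution(want, number, discount):
--     # Sliding-window re-implementation: build counts of the first 10-item window
--     # once, then slide, updating a satisfied-keys counter; O(len(discount)) dict ops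
--     # instead of rebuilding a Counter per window.
--     target = dict(zip(want, number))
--     n = len(discount)
--     if n < 10:
--         return 0
--     keys = list(target)
--     need = len(keys)
--     cnt = {k: 0 for k in keys}
--     for x in discount[:10]:
--         if x in cnt:
--             cnt[x] += 1
--     sat = sum(1 for k in keys if cnt[k] == target[k])
--     answer = 1 if sat == need else 0
--     for i in range(10, n):
--         out = discount[i - 10]
--         if out in cnt:
--             if cnt[out] == target[out]:
--                 sat -= 1
--             cnt[out] -= 1
--             if cnt[out] == target[out]:
--                 sat += 1
--         inn = discount[i]
--         if inn in cnt:
--             if cnt[inn] == target[inn]: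
--                 sat -= 1
--             cnt[inn] += 1
--             if cnt[inn] == target[inn]:
--                 sat += 1
--         if sat == need:
--             answer += 1
--     return answer
-- ===== Notes on version B (the rewrite author's own statement) =====
-- stated objective: faster
-- what changed: Replaces the per-window Counter rebuild with a single sliding window that keeps counts of want-items and a satisfied-keys counter, updating them as one item leaves and one enters.
-- outside the precondition, e.g. on solution(['a', 'b'], [1], ['x', 'x', 'x', 'x', 'x', 'x', 'x', 'x', 'x', 'x']): A returns 0, B returns 0
import Mathlib
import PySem

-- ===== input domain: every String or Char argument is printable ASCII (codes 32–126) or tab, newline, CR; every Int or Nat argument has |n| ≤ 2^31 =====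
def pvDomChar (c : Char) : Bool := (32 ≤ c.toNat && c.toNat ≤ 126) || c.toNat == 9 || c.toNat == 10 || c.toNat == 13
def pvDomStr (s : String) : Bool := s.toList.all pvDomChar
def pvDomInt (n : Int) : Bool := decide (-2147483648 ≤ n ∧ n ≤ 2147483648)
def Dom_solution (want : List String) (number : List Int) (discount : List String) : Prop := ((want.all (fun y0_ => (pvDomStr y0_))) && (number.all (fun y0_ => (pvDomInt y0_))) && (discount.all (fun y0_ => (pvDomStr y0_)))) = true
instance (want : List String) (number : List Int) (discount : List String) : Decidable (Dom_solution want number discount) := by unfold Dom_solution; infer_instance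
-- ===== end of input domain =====

-- B replaces A's per-window Counter rebuild by a single sliding window with a satisfied-keys counter (objective: faster, constant-factor).

-- ===== PORT A =====
-- dict(zip(want, number)) — shared literally by both Pythons' first line
def pvTarget (want : List String) (number : List Int) : PySem.Dict String Int :=
  (want.zip number).foldl (fun d p => d.insert p.1 p.2) PySem.Dict.empty

def solution (want : List String) (number : List Int) (discount : List String) : Int :=
  let want_dict := pvTarget want number
  (PySem.List.pyRange 0 ((discount.length : Int) - 9) 1).foldl
    (fun answer i =>
      let window := PySem.List.slice discount (some i) (some (i + 10))
      let window_counter := PySem.Dict.counter window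
      -- want_dict[item] ported as getD item 0: exact under Pre_solution (the KeyError case is excluded)
      if want.all (fun item => window_counter.getD item 0 == want_dict.getD item 0)
      then answer + 1 else answer) 0

-- ===== PORT B =====
def solution_alt (want : List String) (number : List Int) (discount : List String) : Int :=
  let target := pvTarget want number
  let n : Int := discount.length
  if n < 10 then 0 else
  let keys := target.keys
  let need : Int := keys.length
  let cnt0 : PySem.Dict String Int := keys.foldl (fun d k => d.insert k 0) PySem.Dict.empty
  let cnt1 := (PySem.List.slice discount none (some 10)).foldl
      (fun d x => if d.contains x then d.modify x 0 (· + 1) else d) cnt0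
  let sat0 : Int := keys.foldl (fun s k => if cnt1.getD k 0 == target.getD k 0 then s + 1 else s) 0
  let answer0 : Int := if sat0 == need then 1 else 0
  let res := (PySem.List.pyRange 10 n 1).foldl
    (fun (st : PySem.Dict String Int × Int × Int) i =>
      let cnt := st.1
      let sat := st.2.1
      let answer := st.2.2
      let out := PySem.List.pyGetD discount (i - 10) ""
      let p1 :=
        if cnt.contains out then
          let sat1 := if cnt.getD out 0 == target.getD out 0 then sat - 1 else sat
          let cnt1 := cnt.modify out 0 (· - 1)
          let sat2 := if cnt1.getD out 0 == target.getD out 0 then sat1 + 1 else sat1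
          (cnt1, sat2)
        else (cnt, sat)
      let inn := PySem.List.pyGetD discount i ""
      let p2 :=
        if p1.1.contains inn then
          let sat1 := if p1.1.getD inn 0 == target.getD inn 0 then p1.2 - 1 else p1.2
          let cnt1 := p1.1.modify inn 0 (· + 1)
          let sat2 := if cnt1.getD inn 0 == target.getD inn 0 then sat1 + 1 else sat1
          (cnt1, sat2)
        else p1
      let answer := if p2.2 == need then answer + 1 else answer
      (p2.1, p2.2, answer)) (cnt1, sat0, answer0)
  res.2.2

-- ===== PRECONDITION & SPEC =====
-- Pre_ excludes inputs where want is longer than number AND discount has a full 10-item window: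
-- there dict(zip) drops the tail of want and A raises KeyError unless all()'s short-circuit happens
-- to stop earlier (the cited input is of that accidental-return kind); on misaligned want/number no
-- behaviour is specified.
def Pre_solution (want : List String) (number : List Int) (discount : List String) : Prop :=
  want.length ≤ number.length ∨ discount.length < 10
instance (want : List String) (number : List Int) (discount : List String) : Decidable (Pre_solution want number discount) := by unfold Pre_solution; infer_instance

def pvWitness_solution : List String × List Int × List String :=
  (["a"], [2], ["a", "a", "b", "a", "b", "b", "a", "b", "b", "b", "a"])

def Spec_solution (want : List String) (number : List Int) (discount : List String) (out : Int) : Prop := out = solution_alt want number discount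
instance (want : List String) (number : List Int) (discount : List String) (out : Int) : Decidable (Spec_solution want number discount out) := by unfold Spec_solution; infer_instance

-- ===== CLAIM (what is proved, stated in full; the proofs are below) =====
def Claim_equal_solution : Prop := ∀ (want : List String) (number : List Int) (discount : List String), Dom_solution want number discount → Pre_solution want number discount → Spec_solution want number discount (solution want number discount)

-- ===== LEMMAS AND PROOFS =====

-- the 10-item window starting at s
def pvWin (discount : List String) (s : Nat) : List String := (discount.drop s).take 10

-- "window starting at s satisfies every required count"
def pvG (target : PySem.Dict String Int) (discount : List String) (s : Nat) : Bool :=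
  target.keys.all (fun k => ((pvWin discount s).count k : Int) == target.getD k 0)

-- B's loop body, named for the proofs (definitionally the lambda in solution_alt)
def pvStepB (target : PySem.Dict String Int) (need : Int) (discount : List String) :
    (PySem.Dict String Int × Int × Int) → Int → (PySem.Dict String Int × Int × Int) :=
  fun st i =>
      let cnt := st.1
      let sat := st.2.1
      let answer := st.2.2
      let out := PySem.List.pyGetD discount (i - 10) ""
      let p1 :=
        if cnt.contains out then
          let sat1 := if cnt.getD out 0 == target.getD out 0 then sat - 1 else sat
          let cnt1 := cnt.modify out 0 (· - 1)
          let sat2 := if cnt1.getD out 0 == target.getD out 0 then sat1 + 1 else sat1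
          (cnt1, sat2)
        else (cnt, sat)
      let inn := PySem.List.pyGetD discount i ""
      let p2 :=
        if p1.1.contains inn then
          let sat1 := if p1.1.getD inn 0 == target.getD inn 0 then p1.2 - 1 else p1.2
          let cnt1 := p1.1.modify inn 0 (· + 1)
          let sat2 := if cnt1.getD inn 0 == target.getD inn 0 then sat1 + 1 else sat1
          (cnt1, sat2)
        else p1
      let answer := if p2.2 == need then answer + 1 else answer
      (p2.1, p2.2, answer)

lemma pv_nodup_keys (want : List String) (number : List Int) : (pvTarget want number).keys.Nodup := by
  unfold pvTarget
  exact PySem.Dict.nodup_keys_foldl_insert_key (want.zip number) Prod.fst (fun _ p => p.2)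
    PySem.Dict.empty (by simp [PySem.Dict.keys_empty])

lemma pv_all_keys (want : List String) (number : List Int)
    (h : want.length ≤ number.length) (p : String → Bool) :
    (pvTarget want number).keys.all p = want.all p := by
  unfold pvTarget
  rw [PySem.Dict.keys_foldl_insert_key (want.zip number) Prod.fst (fun _ p => p.2)]
  rw [List.map_fst_zip h]
  simp only [PySem.Dict.keys_empty]
  have : ∀ x, x ∈ PySem.Set.update ([] : List String) want ↔ x ∈ want := by
    intro x
    have : PySem.Set.update ([] : List String) want = PySem.Set.ofList want := by
      simp [PySem.Set.update, PySem.Set.ofList]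
    rw [this, PySem.Set.mem_ofList]
  rw [Bool.eq_iff_iff]
  simp only [List.all_eq_true]
  constructor
  · intro hA x hx; exact hA x ((this x).2 hx)
  · intro hA x hx; exact hA x ((this x).1 hx)

-- countP = length, as the Bool the ports compute
lemma pv_countP_eq_length (l : List String) (p : String → Bool) :
    (((l.countP p : Int)) == ((l.length : Int))) = l.all p := by
  rw [Bool.eq_iff_iff, beq_iff_eq]
  constructor
  · intro h
    have : l.countP p = l.length := by exact_mod_cast h
    rw [List.all_eq_true]
    exact fun x hx => (List.countP_eq_length (l := l) (p := p)).1 this x hx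
  · intro h
    have : l.countP p = l.length :=
      (List.countP_eq_length (l := l) (p := p)).2 (fun x hx => (List.all_eq_true.1 h) x hx)
    exact_mod_cast this

-- changing a predicate at one point changes countP by the indicator difference
lemma pv_countP_update (l : List String) (hnd : l.Nodup) (P P' : String → Bool) (a : String)
    (h : ∀ k, k ≠ a → P' k = P k) :
    (l.countP P' : Int) = (l.countP P : Int) +
      (if a ∈ l then ((if P' a then (1 : Int) else 0) - (if P a then 1 else 0)) else 0) := by
  induction l with
  | nil => simp
  | cons x t ih =>
    rcases List.nodup_cons.1 hnd with ⟨hxt, hnt⟩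
    by_cases hxa : x = a
    · subst hxa
      have ht : t.countP P' = t.countP P :=
        List.countP_congr (fun y hy => by rw [h y (fun e => hxt (e ▸ hy))])
      simp only [List.countP_cons, List.mem_cons, true_or, if_true, ht]
      push_cast
      split_ifs <;> omega
    · have hx' : P' x = P x := h x hxa
      have hmem : (a ∈ x :: t) ↔ (a ∈ t) := by
        simp only [List.mem_cons, or_iff_right_iff_imp]
        intro e; exact absurd (Eq.symm e) hxa
      simp only [List.countP_cons, hx', hmem]
      push_cast
      rw [ih hnt]
      split_ifs <;> omega

-- sliding the window one step changes each count by the leave/enter indicators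
lemma pv_win_shift (discount : List String) (j : Nat) (h10 : 10 ≤ j) (hj : j < discount.length)
    (k : String) :
    ((pvWin discount (j - 9)).count k : Int)
      = ((pvWin discount (j - 10)).count k : Int)
        - (if PySem.List.pyGetD discount ((j : Int) - 10) "" = k then 1 else 0)
        + (if PySem.List.pyGetD discount ((j : Int)) "" = k then 1 else 0) := by
  have hj10 : j - 10 < discount.length := by omega
  have hout : PySem.List.pyGetD discount ((j : Int) - 10) "" = discount[j - 10] := by
    rw [PySem.List.pyGetD_eq_getElem discount "" (by omega) (by omega)]
    simp only [show ((j : Int) - 10).toNat = j - 10 from by omega]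
  have hinn : PySem.List.pyGetD discount ((j : Int)) "" = discount[j] := by
    rw [PySem.List.pyGetD_eq_getElem discount "" (by omega) (by omega)]
    simp only [Int.toNat_natCast]
  have hdrop : discount.drop (j - 10) = discount[j - 10] :: discount.drop (j - 9) := by
    rw [List.drop_eq_getElem_cons hj10]
    show discount[j - 10] :: discount.drop (j - 10 + 1) = _
    congr 2
    omega
  have hlen : 10 ≤ (discount.drop (j - 9)).length := by
    rw [List.length_drop]; omega
  have h9 : (discount.drop (j - 9))[9]'(by omega) = discount[j] := by
    rw [List.getElem_drop]
    congr 1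
    omega
  have hw1 : pvWin discount (j - 10) = discount[j - 10] :: (discount.drop (j - 9)).take 9 := by
    unfold pvWin
    rw [hdrop]
    rfl
  have hw2 : pvWin discount (j - 9) = (discount.drop (j - 9)).take 9 ++ [discount[j]] := by
    unfold pvWin
    rw [show (10 : Nat) = 9 + 1 from rfl, List.take_succ]
    have : (discount.drop (j - 9))[9]? = some discount[j] := by
      rw [List.getElem?_eq_getElem (by omega)]
      rw [h9]
    rw [this]
    rfl
  rw [hout, hinn, hw1, hw2]
  simp only [List.count_cons, List.count_append]
  by_cases h1 : discount[j - 10] = k <;> by_cases h2 : discount[j] = k <;>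
    simp only [h1, h2, beq_iff_eq, if_true, if_false, beq_self_eq_true, List.count_nil] <;>
      push_cast <;> omega

-- building {k: 0 for k in keys}
lemma pv_init_insert (l : List String) (d : PySem.Dict String Int) (k : String) :
    ((l.foldl (fun d k => d.insert k 0) d).contains k = (d.contains k || decide (k ∈ l))) ∧
    ((l.foldl (fun d k => d.insert k 0) d).getD k 0 = if k ∈ l then 0 else d.getD k 0) := by
  induction l generalizing d with
  | nil => simp
  | cons x t ih =>
    simp only [List.foldl_cons]
    obtain ⟨ih1, ih2⟩ := ih (d.insert x 0)
    constructor
    · rw [ih1, PySem.Dict.contains_insert]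
      by_cases hk : k = x
      · simp [hk, List.mem_cons]
      · have hb : (k == x) = false := beq_eq_false_iff_ne.2 hk
        simp [hb, hk, List.mem_cons]
    · rw [ih2, PySem.Dict.getD_insert]
      by_cases hk : k ∈ t <;> by_cases hx : k = x <;> simp [hk, hx, List.mem_cons]

-- the guarded counting loop over the first window
lemma pv_count_fold (l : List String) (d : PySem.Dict String Int) (k : String) :
    ((l.foldl (fun d x => if d.contains x then d.modify x 0 (· + 1) else d) d).contains k
        = d.contains k) ∧
    ((l.foldl (fun d x => if d.contains x then d.modify x 0 (· + 1) else d) d).getD k 0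
        = d.getD k 0 + (if d.contains k then (l.count k : Int) else 0)) := by
  induction l generalizing d with
  | nil => simp
  | cons x t ih =>
    simp only [List.foldl_cons]
    by_cases hx : d.contains x
    · simp only [hx, if_true]
      obtain ⟨ih1, ih2⟩ := ih (d.modify x 0 (· + 1))
      have hc : ∀ k', (d.modify x 0 (· + 1)).contains k' = d.contains k' := by
        intro k'
        rw [PySem.Dict.contains_modify]
        by_cases h : k' = x <;> simp [h, hx]
      constructor
      · rw [ih1, hc]
      · rw [ih2, hc, PySem.Dict.getD_modify]
        by_cases hk : k = x
        · subst hk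
          simp [hx, List.count_cons_self]
          ring
        · have hxk : (x == k) = false := by
            simp only [beq_eq_false_iff_ne, ne_eq]
            exact fun e => hk (Eq.symm e)
          simp [hk, List.count_cons, hxk]
    · rw [if_neg hx]
      obtain ⟨ih1, ih2⟩ := ih d
      refine ⟨ih1, ?_⟩
      rw [ih2]
      by_cases hk : k = x
      · subst hk; simp [hx]
      · have hxk : (x == k) = false := by
          simp only [beq_eq_false_iff_ne, ne_eq]
          exact fun e => hk (Eq.symm e)
        simp [List.count_cons, hxk]

-- one leave/enter phase of B's loop body
lemma pv_phase (target cnt : PySem.Dict String Int) (c : String → Int) (sat : Int) (x : String)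
    (f : Int → Int) (δ : Int) (hf : ∀ v, f v = v + δ)
    (hnd : target.keys.Nodup)
    (hc : ∀ k, cnt.contains k = decide (k ∈ target.keys))
    (hv : ∀ k ∈ target.keys, cnt.getD k 0 = c k)
    (hs : sat = (target.keys.countP (fun k => cnt.getD k 0 == target.getD k 0) : Int)) :
    (∀ k, (if cnt.contains x then
        ((cnt.modify x 0 f),
          (if (cnt.modify x 0 f).getD x 0 == target.getD x 0 then
            (if cnt.getD x 0 == target.getD x 0 then sat - 1 else sat) + 1
           else (if cnt.getD x 0 == target.getD x 0 then sat - 1 else sat)))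
      else (cnt, sat)).1.contains k = decide (k ∈ target.keys)) ∧
    (∀ k ∈ target.keys, (if cnt.contains x then
        ((cnt.modify x 0 f),
          (if (cnt.modify x 0 f).getD x 0 == target.getD x 0 then
            (if cnt.getD x 0 == target.getD x 0 then sat - 1 else sat) + 1
           else (if cnt.getD x 0 == target.getD x 0 then sat - 1 else sat)))
      else (cnt, sat)).1.getD k 0 = c k + (if x = k then δ else 0)) ∧
    ((if cnt.contains x then
        ((cnt.modify x 0 f),
          (if (cnt.modify x 0 f).getD x 0 == target.getD x 0 then
            (if cnt.getD x 0 == target.getD x 0 then sat - 1 else sat) + 1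
           else (if cnt.getD x 0 == target.getD x 0 then sat - 1 else sat)))
      else (cnt, sat)).2
      = (target.keys.countP (fun k => (c k + (if x = k then δ else 0)) == target.getD k 0) : Int)) := by
  by_cases hx : cnt.contains x
  · have hxk : x ∈ target.keys := by
      have := hc x
      rw [hx] at this
      exact of_decide_eq_true (Eq.symm this)
    simp only [hx, if_true]
    have hcv : ∀ k, (cnt.modify x 0 f).getD k 0 = if k = x then f (cnt.getD x 0) else cnt.getD k 0 :=
      fun k => PySem.Dict.getD_modify cnt x k 0 f
    refine ⟨?_, ?_, ?_⟩
    · intro k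
      rw [PySem.Dict.contains_modify, hc k]
      by_cases hkx : k = x
      · simp [hkx, hxk]
      · have : (k == x) = false := beq_eq_false_iff_ne.2 hkx
        simp [this]
    · intro k hk
      rw [hcv k]
      by_cases hkx : k = x
      · subst hkx
        rw [hf, hv k hk]
        simp
      · have hxk' : ¬ x = k := fun e => hkx (Eq.symm e)
        simp only [hkx, if_false, hxk', add_zero]
        exact hv k hk
    · -- the satisfied counter
      have hQP : ∀ k, k ≠ x → ((cnt.modify x 0 f).getD k 0 == target.getD k 0)
          = (cnt.getD k 0 == target.getD k 0) := by
        intro k hk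
        rw [hcv k, if_neg hk]
      have hupd := pv_countP_update target.keys hnd
        (fun k => cnt.getD k 0 == target.getD k 0)
        (fun k => (cnt.modify x 0 f).getD k 0 == target.getD k 0) x hQP
      have hcongr :
          List.countP (fun k => (c k + (if x = k then δ else 0)) == target.getD k 0) target.keys
            = List.countP (fun k => (cnt.modify x 0 f).getD k 0 == target.getD k 0) target.keys := by
        apply List.countP_congr
        intro k hk
        rw [hcv k]
        by_cases hkx : k = x
        · subst hkx
          rw [if_pos rfl, if_pos rfl, hf, hv k hk]
        · have hxk' : ¬ x = k := fun e => hkx (Eq.symm e)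
          rw [if_neg hxk', if_neg hkx, add_zero, hv k hk]
      rw [hcongr, hupd, if_pos hxk, hs]
      by_cases hq : ((cnt.modify x 0 f).getD x 0 == target.getD x 0) = true <;>
        by_cases hp : (cnt.getD x 0 == target.getD x 0) = true <;>
          simp only [hq, hp, if_true, if_false, Bool.false_eq_true] <;> omega
  · simp only [hx, Bool.false_eq_true, if_false]
    refine ⟨hc, ?_, ?_⟩
    · intro k hk
      have hxk : ¬ x = k := by
        intro e
        subst e
        rw [hc x] at hx
        exact hx (decide_eq_true hk)
      simp only [hxk, if_false, add_zero]
      exact hv k hk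
    · rw [hs]
      apply congrArg
      apply List.countP_congr
      intro k hk
      have hxk : ¬ x = k := by
        intro e
        subst e
        rw [hc x] at hx
        exact hx (decide_eq_true hk)
      rw [hv k hk, if_neg hxk, add_zero]

-- B's sliding loop, by induction on the number of remaining steps
lemma pv_loopB (target : PySem.Dict String Int) (discount : List String) (need : Int)
    (hneed : need = (target.keys.length : Int)) (hnd : target.keys.Nodup)
    (m : Nat) :
    ∀ (j : Nat), 10 ≤ j → j + m = discount.length →
    ∀ (cnt : PySem.Dict String Int) (sat ans : Int),
    (∀ k, cnt.contains k = decide (k ∈ target.keys)) →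
    (∀ k ∈ target.keys, cnt.getD k 0 = ((pvWin discount (j - 10)).count k : Int)) →
    (sat = (target.keys.countP (fun k => cnt.getD k 0 == target.getD k 0) : Int)) →
    ((PySem.List.pyRange (j : Int) (discount.length : Int) 1).foldl
        (pvStepB target need discount) (cnt, sat, ans)).2.2
      = ans + ((List.range' (j - 9) m).countP (pvG target discount) : Int) := by
  induction m with
  | zero =>
    intro j hj hjm cnt sat ans hc hv hs
    rw [PySem.List.pyRange_one_eq_nil (by omega)]
    simp
  | succ m ih =>
    intro j hj hjm cnt sat ans hc hv hs
    have hjL : (j : Int) < (discount.length : Int) := by omega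
    rw [PySem.List.pyRange_one_cons hjL, List.foldl_cons]
    -- the two phases of the loop body
    obtain ⟨h1c, h1v, h1s⟩ := pv_phase target cnt
      (fun k => ((pvWin discount (j - 10)).count k : Int)) sat
      (PySem.List.pyGetD discount ((j : Int) - 10) "") (· - 1) (-1)
      (fun v => by ring) hnd hc hv hs
    set out := PySem.List.pyGetD discount ((j : Int) - 10) "" with hout
    set inn := PySem.List.pyGetD discount ((j : Int)) "" with hinn
    set p1 := (if cnt.contains out then
        ((cnt.modify out 0 (· - 1)),
          (if (cnt.modify out 0 (· - 1)).getD out 0 == target.getD out 0 then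
            (if cnt.getD out 0 == target.getD out 0 then sat - 1 else sat) + 1
           else (if cnt.getD out 0 == target.getD out 0 then sat - 1 else sat)))
      else (cnt, sat)) with hp1
    have h1s' : p1.2 = (target.keys.countP
        (fun k => p1.1.getD k 0 == target.getD k 0) : Int) := by
      rw [h1s]
      apply congrArg
      apply List.countP_congr
      intro k hk
      rw [h1v k hk]
    obtain ⟨h2c, h2v, h2s⟩ := pv_phase target p1.1
      (fun k => ((pvWin discount (j - 10)).count k : Int) + (if out = k then -1 else 0)) p1.2
      inn (· + 1) 1 (fun v => rfl) hnd h1c h1v h1s'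
    set p2 := (if p1.1.contains inn then
        ((p1.1.modify inn 0 (· + 1)),
          (if (p1.1.modify inn 0 (· + 1)).getD inn 0 == target.getD inn 0 then
            (if p1.1.getD inn 0 == target.getD inn 0 then p1.2 - 1 else p1.2) + 1
           else (if p1.1.getD inn 0 == target.getD inn 0 then p1.2 - 1 else p1.2)))
      else p1) with hp2
    -- after both phases the counts are those of the next window
    have hshift : ∀ k, ((pvWin discount (j - 10)).count k : Int)
        + (if out = k then -1 else 0) + (if inn = k then 1 else 0)
        = ((pvWin discount (j - 9)).count k : Int) := by
      intro k
      rw [pv_win_shift discount j hj (by omega) k, ← hout, ← hinn]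
      split_ifs <;> push_cast <;> ring
    have h2v' : ∀ k ∈ target.keys,
        p2.1.getD k 0 = ((pvWin discount (j + 1 - 10)).count k : Int) := by
      intro k hk
      rw [show j + 1 - 10 = j - 9 from by omega, ← hshift k]
      rw [h2v k hk]
    have h2s' : p2.2 = (target.keys.countP
        (fun k => p2.1.getD k 0 == target.getD k 0) : Int) := by
      rw [h2s]
      apply congrArg
      apply List.countP_congr
      intro k hk
      rw [h2v k hk]
    -- the step function really is the two phases plus the answer update
    have hstep : pvStepB target need discount (cnt, sat, ans) (j : Int)
        = (p2.1, p2.2, if p2.2 == need then ans + 1 else ans) := by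
      simp only [pvStepB, hp1, hp2, hout, hinn]
    rw [hstep]
    -- the answer increment is the window test at j - 9
    have hGood : (p2.2 == need) = pvG target discount (j - 9) := by
      rw [h2s', hneed, pv_countP_eq_length]
      unfold pvG
      rw [Bool.eq_iff_iff]
      simp only [List.all_eq_true]
      constructor
      · intro hA k hk
        have := hA k hk
        rw [h2v' k hk, show j + 1 - 10 = j - 9 from by omega] at this
        exact this
      · intro hA k hk
        rw [h2v' k hk, show j + 1 - 10 = j - 9 from by omega]
        exact hA k hk
    have hcast : ((j : Int) + 1) = (((j + 1 : Nat)) : Int) := by push_cast; ring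
    have hA1 : 10 ≤ j + 1 := by omega
    have hA2 : (j + 1) + m = discount.length := by omega
    rw [hcast, ih (j + 1) hA1 hA2 p2.1 p2.2 _ h2c h2v' h2s']
    have hrange : List.range' (j - 9) (m + 1) = (j - 9) :: List.range' (j + 1 - 9) m := by
      rw [List.range'_succ, show j - 9 + 1 = j + 1 - 9 from by omega]
    rw [hrange]
    rw [List.countP_cons, hGood]
    by_cases hg : pvG target discount (j - 9) = true <;> simp [hg] <;> push_cast <;> ring


-- A equals the window count (under Pre_)
lemma pv_A_eq (want : List String) (number : List Int) (discount : List String)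
    (h : Pre_solution want number discount) :
    solution want number discount
      = ((List.range (discount.length - 9)).countP (pvG (pvTarget want number) discount) : Int) := by
  by_cases hL : discount.length < 10
  · unfold solution
    rw [PySem.List.pyRange_one_eq_nil (by omega : (discount.length : Int) - 9 ≤ 0)]
    rw [show discount.length - 9 = 0 from by omega]
    simp
  · have hwn : want.length ≤ number.length := h.resolve_right hL
    unfold solution
    rw [PySem.List.pyRange_one 0 ((discount.length : Int) - 9), List.foldl_map,
      PySem.List.foldl_if_add_one, zero_add]
    rw [show ((discount.length : Int) - 9 - 0).toNat = discount.length - 9 from by omega]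
    apply congrArg
    apply List.countP_congr
    intro k _
    have hsl : PySem.List.slice discount (some (0 + (k : Int))) (some (0 + (k : Int) + 10))
        = pvWin discount k := by
      rw [show (0 + (k : Int)) = ((k : Nat) : Int) from by push_cast; ring,
        show ((k : Int) + 10) = ((k : Int) + ((10 : Nat) : Int)) from by norm_num,
        PySem.List.slice_natCast_add]
      rfl
    rw [hsl]
    have hcnt : ∀ item, (PySem.Dict.counter (pvWin discount k)).getD item 0
        = ((pvWin discount k).count item : Int) := fun item =>
      PySem.Dict.getD_counter (pvWin discount k) item
    unfold pvG
    rw [pv_all_keys want number hwn]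
    constructor
    · intro hA
      rw [List.all_eq_true] at *
      intro x hx
      have := hA x hx
      rwa [hcnt x] at this
    · intro hA
      rw [List.all_eq_true] at *
      intro x hx
      rw [hcnt x]
      exact hA x hx

-- B equals the window count (unconditionally)
lemma pv_B_eq (want : List String) (number : List Int) (discount : List String) :
    solution_alt want number discount
      = ((List.range (discount.length - 9)).countP (pvG (pvTarget want number) discount) : Int) := by
  by_cases hL : (discount.length : Int) < 10
  · simp only [solution_alt]
    rw [if_pos hL, show discount.length - 9 = 0 from by omega]
    simp
  · have hL10 : 10 ≤ discount.length := by omega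
    simp only [solution_alt]
    rw [if_neg hL]
    set target := pvTarget want number with htarget
    set need : Int := (target.keys.length : Int) with hneed
    set cnt0 : PySem.Dict String Int :=
      target.keys.foldl (fun d k => d.insert k 0) PySem.Dict.empty with hcnt0
    set cnt1 := (PySem.List.slice discount none (some 10)).foldl
      (fun d x => if d.contains x then d.modify x 0 (· + 1) else d) cnt0 with hcnt1
    set sat0 : Int :=
      target.keys.foldl (fun s k => if cnt1.getD k 0 == target.getD k 0 then s + 1 else s) 0
      with hsat0
    set answer0 : Int := if sat0 == need then 1 else 0 with hans0
    have hnd := pv_nodup_keys want number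
    -- initial invariants
    have hsl10 : PySem.List.slice discount none (some 10) = discount.take 10 := by
      rw [PySem.List.slice_to discount (by norm_num)]
      rfl
    have hc0 : ∀ k, cnt0.contains k = decide (k ∈ target.keys) := by
      intro k
      have := (pv_init_insert target.keys PySem.Dict.empty k).1
      rw [hcnt0, this, PySem.Dict.contains_empty]
      simp
    have hg0 : ∀ k, cnt0.getD k 0 = 0 := by
      intro k
      have := (pv_init_insert target.keys PySem.Dict.empty k).2
      rw [hcnt0, this]
      by_cases hk : k ∈ target.keys <;> simp [hk, PySem.Dict.getD_empty]
    have hc1 : ∀ k, cnt1.contains k = decide (k ∈ target.keys) := by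
      intro k
      have := (pv_count_fold (PySem.List.slice discount none (some 10)) cnt0 k).1
      rw [hcnt1, this, hc0]
    have hv1 : ∀ k ∈ target.keys, cnt1.getD k 0 = ((pvWin discount (10 - 10)).count k : Int) := by
      intro k hk
      have := (pv_count_fold (PySem.List.slice discount none (some 10)) cnt0 k).2
      rw [hcnt1, this, hg0, hc0 k, hsl10]
      simp only [hk, decide_true, if_true, zero_add]
      unfold pvWin
      rw [show (10 : Nat) - 10 = 0 from rfl, List.drop_zero]
    have hs1 : sat0 = (target.keys.countP
        (fun k => cnt1.getD k 0 == target.getD k 0) : Int) := by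
      rw [hsat0, PySem.List.foldl_if_add_one, zero_add]
    -- the loop
    have hmain := pv_loopB target discount need hneed hnd (discount.length - 10) 10 (by norm_num)
      (by omega) cnt1 sat0 answer0 hc1 hv1 hs1
    show (List.foldl (pvStepB target need discount) (cnt1, sat0, answer0)
        (PySem.List.pyRange (((10 : Nat)) : Int) (discount.length : Int) 1)).2.2
      = ((List.range (discount.length - 9)).countP (pvG target discount) : Int)
    rw [hmain]
    -- the first window's contribution
    have hGood0 : (sat0 == need) = pvG target discount 0 := by
      rw [hs1, hneed, pv_countP_eq_length]
      unfold pvG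
      rw [Bool.eq_iff_iff]
      simp only [List.all_eq_true]
      constructor
      · intro hA k hk
        have := hA k hk
        rwa [hv1 k hk, show (10 : Nat) - 10 = 0 from rfl] at this
      · intro hA k hk
        rw [hv1 k hk, show (10 : Nat) - 10 = 0 from rfl]
        exact hA k hk
    rw [hans0, hGood0]
    rw [show List.range (discount.length - 9) = 0 :: List.range' (10 - 9) (discount.length - 10)
        from by
      rw [List.range_eq_range',
        show discount.length - 9 = (discount.length - 10) + 1 from by omega,
        List.range'_succ]]
    rw [List.countP_cons]
    by_cases hg : pvG target discount 0 = true <;> simp [hg] <;> push_cast <;> ring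

-- ===== VERDICT (by name: the statement is the Claim_ definition above) =====
theorem solution_spec : Claim_equal_solution := by
  intro want number discount _ hpre
  unfold Spec_solution
  rw [pv_A_eq want number discount hpre, pv_B_eq want number discount]
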